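-- pv_equiv track=rewrite | github.com/alisonhau/10-301 | hw4/handout/tagger.py | parse_model_two
-- ===== SOURCE A (Python) =====
-- def parse_model_two(train_info):
--   x = []
--   y = []
--   label_dict = {}
--   word_dict = {}
--   for elems in train_info:
--     #checks non-empty
--     if elems:
--       if elems[1] not in label_dict:
--         y.append(len(label_dict))
--         label_dict[elems[1]] = len(label_dict)
--       else:
--         y.append(label_dict[elems[1]])
--       if elems[0] not in word_dict:
--         x.append(len(word_dict) + 1)
--         word_dict[elems[0]] = len(word_dict) + 1
--       else:
--         x.append(word_dict[elems[0]])
--     else: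
--       x.append(-1)
--       y.append(-1)
--   k = len(label_dict) # unique labels
--   m = len(word_dict)  # unique words
--   theta = [[0 for i in range(3*m+4)] for j in range(k+1)]
--   return word_dict, label_dict, x, y, theta
-- ===== SOURCE B (Python) =====
-- def parse_model_two(train_info):
--   # Two-pass decomposition: one pass builds the dicts, then x/y fall out as
--   # simple lookups, and theta rows are built with list repetition.
--   word_dict = {}
--   label_dict = {}
--   for elems in train_info:
--     if elems:
--       if elems[1] not in label_dict:
--         label_dict[elems[1]] = len(label_dict)
--       if elems[0] not in word_dict:
--         word_dict[elems[0]] = len(word_dict) + 1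
--   x = [word_dict[elems[0]] if elems else -1 for elems in train_info]
--   y = [label_dict[elems[1]] if elems else -1 for elems in train_info]
--   k = len(label_dict)
--   m = len(word_dict)
--   theta = [[0] * (3 * m + 4) for _ in range(k + 1)]
--   return word_dict, label_dict, x, y, theta
-- ===== Notes on version B (the rewrite author's own statement) =====
-- stated objective: simpler
-- what changed: A's single loop interleaving dict building with x/y accumulation is split into one dict-building pass followed by plain lookup comprehensions for x and y, with theta built by list repetition.
-- outside the precondition, e.g. on parse_model_two([['word']]): A raises IndexError, B raises IndexError
import Mathlib
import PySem

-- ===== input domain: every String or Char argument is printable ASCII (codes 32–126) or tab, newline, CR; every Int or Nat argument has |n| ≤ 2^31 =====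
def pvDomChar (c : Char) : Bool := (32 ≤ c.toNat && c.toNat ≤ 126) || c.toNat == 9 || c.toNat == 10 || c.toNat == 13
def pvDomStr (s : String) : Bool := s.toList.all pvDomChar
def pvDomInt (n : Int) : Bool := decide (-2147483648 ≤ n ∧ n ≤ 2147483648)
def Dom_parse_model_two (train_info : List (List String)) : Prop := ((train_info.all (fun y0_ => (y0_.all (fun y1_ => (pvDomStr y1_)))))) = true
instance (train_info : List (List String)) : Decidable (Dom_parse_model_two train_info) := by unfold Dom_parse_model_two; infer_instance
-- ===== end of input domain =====

-- B splits A's single loop into a dict-building pass followed by lookup comprehensions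
-- for x and y (objective: simpler decomposition; same cost).

-- first-match association-list lookup (Python dict lookup; keys here are never overwritten)
def pvLookup : List (String × Int) → String → Option Int
  | [], _ => none
  | (k, v) :: t, a => if k = a then some v else pvLookup t a

-- ===== PORT A =====
-- the single loop of A, carrying word_dict, label_dict, x, y
def loopA : List (List String) → List (String × Int) → List (String × Int) →
    List Int → List Int →
    (List (String × Int)) × (List (String × Int)) × List Int × List Int
  | [], wd, ld, x, y => (wd, ld, x, y)
  | elems :: rest, wd, ld, x, y =>
    match elems with
    | [] => loopA rest wd ld (x ++ [-1]) (y ++ [-1])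
    | a :: b :: _ =>
      let p1 : List Int × List (String × Int) :=
        match pvLookup ld b with
        | none => (y ++ [(ld.length : Int)], ld ++ [(b, (ld.length : Int))])
        | some v => (y ++ [v], ld)
      let p2 : List Int × List (String × Int) :=
        match pvLookup wd a with
        | none => (x ++ [(wd.length : Int) + 1], wd ++ [(a, (wd.length : Int) + 1)])
        | some v => (x ++ [v], wd)
      loopA rest p2.2 p1.2 p2.1 p1.1
    | [_] => loopA rest wd ld x y   -- Python raises IndexError on elems[1]; excluded by Pre_

def parse_model_two (train_info : List (List String)) :
    (List (String × Int)) × (List (String × Int)) × List Int × List Int × List (List Int) :=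
  let r := loopA train_info [] [] [] []
  let k := r.2.1.length
  let m := r.1.length
  let theta := (List.range (k + 1)).map (fun _ => (List.range (3 * m + 4)).map (fun _ => (0 : Int)))
  (r.1, r.2.1, r.2.2.1, r.2.2.2, theta)

-- ===== PORT B =====
-- pass 1: build word_dict and label_dict only
def passDicts : List (List String) → List (String × Int) → List (String × Int) →
    (List (String × Int)) × (List (String × Int))
  | [], wd, ld => (wd, ld)
  | elems :: rest, wd, ld =>
    match elems with
    | a :: b :: _ =>
      let ld' := if (pvLookup ld b).isNone then ld ++ [(b, (ld.length : Int))] else ld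
      let wd' := if (pvLookup wd a).isNone then wd ++ [(a, (wd.length : Int) + 1)] else wd
      passDicts rest wd' ld'
    | _ => passDicts rest wd ld   -- []: skipped; [_]: Python raises, excluded by Pre_

-- pass 2 comprehensions: lookup is always a hit under Pre_, so getD 0 is exact there
def xOf (wd : List (String × Int)) (elems : List String) : Int :=
  match elems with
  | [] => -1
  | a :: _ => (pvLookup wd a).getD 0

def yOf (ld : List (String × Int)) (elems : List String) : Int :=
  match elems with
  | _ :: b :: _ => (pvLookup ld b).getD 0
  | _ => -1

def parse_model_two_alt (train_info : List (List String)) :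
    (List (String × Int)) × (List (String × Int)) × List Int × List Int × List (List Int) :=
  let p := passDicts train_info [] []
  let x := train_info.map (xOf p.1)
  let y := train_info.map (yOf p.2)
  let k := p.2.length
  let m := p.1.length
  let theta := List.replicate (k + 1) (List.replicate (3 * m + 4) (0 : Int))
  (p.1, p.2, x, y, theta)

-- ===== PRECONDITION & SPEC =====
-- Pre_ excludes inputs containing a one-element row, on which A raises IndexError at elems[1].
def Pre_parse_model_two (train_info : List (List String)) : Prop :=
  ∀ e ∈ train_info, e = [] ∨ 2 ≤ e.length
instance (train_info : List (List String)) : Decidable (Pre_parse_model_two train_info) := by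
  unfold Pre_parse_model_two; infer_instance

def pvWitness_parse_model_two : List (List String) :=
  [["the", "D"], [], ["cat", "N"], ["the", "D"]]

def Spec_parse_model_two (train_info : List (List String))
    (out : (List (String × Int)) × (List (String × Int)) × List Int × List Int × List (List Int)) : Prop :=
  out = parse_model_two_alt train_info
instance (train_info : List (List String))
    (out : (List (String × Int)) × (List (String × Int)) × List Int × List Int × List (List Int)) :
    Decidable (Spec_parse_model_two train_info out) := by
  unfold Spec_parse_model_two; infer_instance

-- ===== CLAIM =====
def Claim_equal_parse_model_two : Prop :=
  ∀ (train_info : List (List String)), Dom_parse_model_two train_info →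
    Pre_parse_model_two train_info →
    Spec_parse_model_two train_info (parse_model_two train_info)

-- ===== LEMMAS AND PROOFS =====

theorem pvLookup_append_some {d : List (String × Int)} {a : String} {v : Int}
    (h : pvLookup d a = some v) (e : List (String × Int)) :
    pvLookup (d ++ e) a = some v := by
  induction d with
  | nil => simp [pvLookup] at h
  | cons p t ih =>
    obtain ⟨k, w⟩ := p
    simp only [pvLookup, List.cons_append] at *
    split at h <;> simp_all

theorem pvLookup_append_of_none {d : List (String × Int)} {a : String}
    (h : pvLookup d a = none) (v : Int) :
    pvLookup (d ++ [(a, v)]) a = some v := by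
  induction d with
  | nil => simp [pvLookup]
  | cons p t ih =>
    obtain ⟨k, w⟩ := p
    simp only [pvLookup, List.cons_append] at *
    split at h <;> simp_all

theorem passDicts_extends : ∀ (ti : List (List String)) (wd ld : List (String × Int)),
    ∃ we le, passDicts ti wd ld = (wd ++ we, ld ++ le) := by
  intro ti
  induction ti with
  | nil => intro wd ld; exact ⟨[], [], by simp [passDicts]⟩
  | cons e rest ih =>
    intro wd ld
    match e with
    | [] => simpa [passDicts] using ih wd ld
    | [a] => simpa [passDicts] using ih wd ld
    | a :: b :: t =>
      simp only [passDicts]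
      obtain ⟨we, le, h⟩ := ih
        (if (pvLookup wd a).isNone then wd ++ [(a, (wd.length : Int) + 1)] else wd)
        (if (pvLookup ld b).isNone then ld ++ [(b, (ld.length : Int))] else ld)
      refine ⟨(if (pvLookup wd a).isNone then [(a, (wd.length : Int) + 1)] else []) ++ we,
              (if (pvLookup ld b).isNone then [(b, (ld.length : Int))] else []) ++ le, ?_⟩
      rw [h]
      simp only [Prod.mk.injEq]
      constructor <;> split <;> simp

-- lookup of a key already present survives the rest of pass 1
theorem pvLookup_passDicts_fst {ti : List (List String)} {wd ld : List (String × Int)}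
    {a : String} {v : Int} (h : pvLookup wd a = some v) :
    pvLookup (passDicts ti wd ld).1 a = some v := by
  obtain ⟨we, le, he⟩ := passDicts_extends ti wd ld
  rw [he]; exact pvLookup_append_some h we

theorem pvLookup_passDicts_snd {ti : List (List String)} {wd ld : List (String × Int)}
    {b : String} {v : Int} (h : pvLookup ld b = some v) :
    pvLookup (passDicts ti wd ld).2 b = some v := by
  obtain ⟨we, le, he⟩ := passDicts_extends ti wd ld
  rw [he]; exact pvLookup_append_some h le

theorem loopA_eq : ∀ (ti : List (List String)) (wd ld : List (String × Int))
    (x y : List Int), (∀ e ∈ ti, e = [] ∨ 2 ≤ e.length) →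
    loopA ti wd ld x y =
      ((passDicts ti wd ld).1, (passDicts ti wd ld).2,
       x ++ ti.map (xOf (passDicts ti wd ld).1),
       y ++ ti.map (yOf (passDicts ti wd ld).2)) := by
  intro ti
  induction ti with
  | nil => intro wd ld x y _; simp [loopA, passDicts]
  | cons e rest ih =>
    intro wd ld x y hpre
    have hrest : ∀ e ∈ rest, e = [] ∨ 2 ≤ e.length := fun e he => hpre e (List.mem_cons_of_mem _ he)
    have he := hpre e (by simp)
    match e with
    | [] =>
      simp only [loopA, passDicts, List.map_cons, xOf, yOf]
      rw [ih wd ld _ _ hrest]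
      simp
    | [a] => rcases he with h | h <;> simp at h
    | a :: b :: t =>
      simp only [loopA, passDicts, List.map_cons]
      -- the dicts after this step, as in passDicts
      set ld1 := if (pvLookup ld b).isNone then ld ++ [(b, (ld.length : Int))] else ld with hld1
      set wd1 := if (pvLookup wd a).isNone then wd ++ [(a, (wd.length : Int) + 1)] else wd with hwd1
      -- values appended by A this step
      have hyv : ∃ yv, (match pvLookup ld b with
            | none => (y ++ [(ld.length : Int)], ld ++ [(b, (ld.length : Int))])
            | some v => (y ++ [v], ld)) = (y ++ [yv], ld1) ∧ pvLookup ld1 b = some yv := by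
        cases h : pvLookup ld b with
        | none => exact ⟨(ld.length : Int), by simp [hld1, h], by
            simp only [hld1, h, Option.isNone_none, if_pos]
            exact pvLookup_append_of_none h _⟩
        | some v => exact ⟨v, by simp [hld1, h], by simp [hld1, h]⟩
      have hxv : ∃ xv, (match pvLookup wd a with
            | none => (x ++ [(wd.length : Int) + 1], wd ++ [(a, (wd.length : Int) + 1)])
            | some v => (x ++ [v], wd)) = (x ++ [xv], wd1) ∧ pvLookup wd1 a = some xv := by
        cases h : pvLookup wd a with
        | none => exact ⟨(wd.length : Int) + 1, by simp [hwd1, h], by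
            simp only [hwd1, h, Option.isNone_none, if_pos]
            exact pvLookup_append_of_none h _⟩
        | some v => exact ⟨v, by simp [hwd1, h], by simp [hwd1, h]⟩
      obtain ⟨yv, hy1, hy2⟩ := hyv
      obtain ⟨xv, hx1, hx2⟩ := hxv
      rw [hy1, hx1]
      rw [ih wd1 ld1 _ _ hrest]
      have hxfin := pvLookup_passDicts_fst (ti := rest) (ld := ld1) hx2
      have hyfin := pvLookup_passDicts_snd (ti := rest) (wd := wd1) hy2
      simp [xOf, yOf, hxfin, hyfin, List.append_assoc]

-- ===== VERDICT =====
theorem parse_model_two_spec : Claim_equal_parse_model_two := by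
  intro ti _ hpre
  unfold Spec_parse_model_two parse_model_two parse_model_two_alt
  rw [loopA_eq ti [] [] [] [] hpre]
  simp [List.map_const']
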